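-- pv_equiv track=rewrite | github.com/zhoubohan0/NOLO | recbert_policy/train_vnbert_real.py | action_with_duration
-- ===== SOURCE A (Python) =====
-- def action_with_duration(actions, k=3):
--     new_actions = []
--     cur_action, duration = actions[0], 1
--     for i in range(1,len(actions)):
--         if actions[i] == cur_action:
--             duration += 1
--         else:
--             new_actions.extend([cur_action * k + min(j,k)-1 for j in range(duration,0,-1)])
--             cur_action, duration = actions[i], 1
--     new_actions.extend([cur_action * k + min(j,k)-1 for j in range(duration,0,-1)])
--     assert len(new_actions) == len(actions)
--     return new_actions
-- ===== SOURCE B (Python) =====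
-- def action_with_duration(actions, k=3):
--     n = len(actions)
--     if n == 0:
--         return []
--     result = [0] * n
--     counter = 0
--     for i in range(n - 1, -1, -1):
--         if i == n - 1 or actions[i] != actions[i + 1]:
--             counter = 1
--         else:
--             counter += 1
--         result[i] = actions[i] * k + min(counter, k) - 1
--     return result
-- ===== Notes on version B (the rewrite author's own statement) =====
-- stated objective: alternative
-- what changed: Replaces the forward run-grouping with inner reverse-range comprehensions by a single right-to-left scan that maintains a run counter and writes each element's value directly (no per-run list building/extend).
import Mathlib
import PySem

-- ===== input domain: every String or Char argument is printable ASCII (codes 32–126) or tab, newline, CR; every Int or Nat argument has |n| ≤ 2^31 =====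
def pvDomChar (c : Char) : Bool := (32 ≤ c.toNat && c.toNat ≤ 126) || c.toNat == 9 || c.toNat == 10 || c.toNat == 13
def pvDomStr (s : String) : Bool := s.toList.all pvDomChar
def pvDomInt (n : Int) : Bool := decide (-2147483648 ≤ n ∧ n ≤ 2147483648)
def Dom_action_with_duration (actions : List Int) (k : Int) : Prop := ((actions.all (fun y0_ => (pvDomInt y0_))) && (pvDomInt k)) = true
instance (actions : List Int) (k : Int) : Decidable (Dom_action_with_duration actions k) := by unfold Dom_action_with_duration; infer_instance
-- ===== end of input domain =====

-- B replaces A's forward run-grouping (with inner reverse-range comprehensions) by a single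
-- right-to-left scan maintaining a run counter; same O(n) cost, different decomposition.

-- ===== PORT A =====
-- the inner comprehension [cur * k + min(j,k)-1 for j in range(duration,0,-1)]
def pvBurstA (cur k dur : Int) : List Int :=
  (PySem.List.pyRange dur 0 (-1)).map (fun j => cur * k + min j k - 1)

-- one iteration of A's loop body, state = (new_actions, cur_action, duration)
def pvAstep (k : Int) (st : List Int × Int × Int) (ai : Int) : List Int × Int × Int :=
  if ai = st.2.1 then (st.1, st.2.1, st.2.2 + 1)
  else (st.1 ++ pvBurstA st.2.1 k st.2.2, ai, 1)

def action_with_duration (actions : List Int) (k : Int) : List Int :=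
  match actions with
  | [] => []  -- unreachable under Pre_ (Python raises IndexError reading the first element)
  | a0 :: rest =>
    let st := rest.foldl (pvAstep k) ([], a0, 1)
    st.1 ++ pvBurstA st.2.1 k st.2.2

-- ===== PORT B =====
-- one iteration of B's backward loop, state = (result suffix, counter, actions[i+1] if any)
def pvBcounter (a : Int) (st : List Int × Int × Option Int) : Int :=
  match st.2.2 with
  | none => 1
  | some p => if a ≠ p then 1 else st.2.1 + 1

def pvBstep (k : Int) (a : Int) (st : List Int × Int × Option Int) : List Int × Int × Option Int :=
  ((a * k + min (pvBcounter a st) k - 1) :: st.1, pvBcounter a st, some a)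

def action_with_duration_alt (actions : List Int) (k : Int) : List Int :=
  (actions.foldr (pvBstep k) ([], 0, none)).1

-- ===== PRECONDITION & SPEC =====
-- Pre_ excludes only the empty list, on which Python A raises IndexError reading its first element.
def Pre_action_with_duration (actions : List Int) (k : Int) : Prop := actions ≠ []
instance (actions : List Int) (k : Int) : Decidable (Pre_action_with_duration actions k) := by
  unfold Pre_action_with_duration; infer_instance

def pvWitness_action_with_duration : List Int × Int := ([1, 1, 2], 3)

def Spec_action_with_duration (actions : List Int) (k : Int) (out : List Int) : Prop :=
  out = action_with_duration_alt actions k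
instance (actions : List Int) (k : Int) (out : List Int) : Decidable (Spec_action_with_duration actions k out) := by
  unfold Spec_action_with_duration; infer_instance

-- ===== CLAIM (what is proved, stated in full; the proofs are below) =====
def Claim_equal_action_with_duration : Prop :=
  ∀ (actions : List Int) (k : Int), Dom_action_with_duration actions k →
    Pre_action_with_duration actions k →
    Spec_action_with_duration actions k (action_with_duration actions k)

-- ===== LEMMAS AND PROOFS =====

-- peel the largest element off a countdown burst
theorem pvBurstA_cons (c k d : Int) (h : 0 < d) :
    pvBurstA c k d = (c * k + min d k - 1) :: pvBurstA c k (d - 1) := by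
  unfold pvBurstA
  rw [PySem.List.pyRange_neg_one_cons h]
  simp

theorem pvBurstA_one (c k : Int) : pvBurstA c k 1 = [c * k + min 1 k - 1] := by
  rw [pvBurstA_cons c k 1 (by norm_num)]
  unfold pvBurstA
  rw [PySem.List.pyRange_neg_one_eq_nil (by norm_num)]
  simp

-- A's accumulator is only appended to: the prefix factors out of the fold
theorem pvAfold_prefix (k : Int) (l : List Int) :
    ∀ (na : List Int) (c d : Int),
      l.foldl (pvAstep k) (na, c, d)
        = (na ++ (l.foldl (pvAstep k) ([], c, d)).1, (l.foldl (pvAstep k) ([], c, d)).2) := by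
  induction l with
  | nil => intro na c d; simp
  | cons b l ih =>
    intro na c d
    by_cases hb : b = c
    · simp only [List.foldl_cons, pvAstep, if_pos hb]
      exact ih na c (d + 1)
    · simp only [List.foldl_cons, pvAstep, if_neg hb, List.nil_append]
      rw [ih (na ++ pvBurstA c k d) b 1, ih (pvBurstA c k d) b 1]
      simp [List.append_assoc]

-- the third component of B's fold state is the head of the processed suffix
theorem pvBfold_prev (k : Int) (m : List Int) :
    (m.foldr (pvBstep k) ([], 0, none)).2.2 = m.head? := by
  cases m with
  | nil => rfl
  | cons a m => simp [pvBstep]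

-- folding a run of (n+1) copies of c onto a suffix whose head differs from c
theorem pvBfold_replicate (k c : Int) (n : Nat) (m : List Int) (hm : m.head? ≠ some c) :
    (List.replicate (n + 1) c ++ m).foldr (pvBstep k) ([], 0, none)
      = (pvBurstA c k ((n : Int) + 1) ++ (m.foldr (pvBstep k) ([], 0, none)).1,
         (n : Int) + 1, some c) := by
  induction n with
  | zero =>
    simp only [List.replicate_succ, List.replicate_zero,
      List.singleton_append, List.foldr_cons]
    simp only [pvBstep, pvBcounter, pvBfold_prev k m]
    cases hh : m.head? with
    | none => simp [pvBurstA_one]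
    | some p =>
      have hne : c ≠ p := fun h => hm (by rw [hh, h])
      simp [hne, pvBurstA_one]
  | succ n ih =>
    have hrep : List.replicate (n + 1 + 1) c ++ m = c :: (List.replicate (n + 1) c ++ m) := by
      simp [List.replicate_succ]
    rw [hrep, List.foldr_cons, ih]
    simp only [pvBstep, pvBcounter]
    have hne : ¬ (c ≠ c) := by simp
    rw [if_neg hne]
    have h1 : ((n + 1 : Nat) : Int) + 1 = ((n : Int) + 1) + 1 := by push_cast; ring
    rw [h1, pvBurstA_cons c k ((n : Int) + 1 + 1) (by positivity)]
    have h2 : (n : Int) + 1 + 1 - 1 = (n : Int) + 1 := by ring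
    rw [h2]
    simp

-- main invariant: A with pending run (c repeated n+1) before l equals B on that full list
theorem pvMain (k : Int) (l : List Int) :
    ∀ (c : Int) (n : Nat),
      (l.foldl (pvAstep k) ([], c, (n : Int) + 1)).1
          ++ pvBurstA (l.foldl (pvAstep k) ([], c, (n : Int) + 1)).2.1 k
               (l.foldl (pvAstep k) ([], c, (n : Int) + 1)).2.2
        = ((List.replicate (n + 1) c ++ l).foldr (pvBstep k) ([], 0, none)).1 := by
  induction l with
  | nil =>
    intro c n
    rw [pvBfold_replicate k c n [] (by simp)]
    simp
  | cons b l ih =>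
    intro c n
    by_cases hb : b = c
    · simp only [List.foldl_cons, pvAstep, if_pos hb]
      subst hb
      have h1 : ((n : Int) + 1) + 1 = ((n + 1 : Nat) : Int) + 1 := by push_cast; ring
      rw [h1, ih b (n + 1)]
      have h2 : List.replicate (n + 1) b ++ b :: l = List.replicate (n + 1 + 1) b ++ l := by
        simp [List.replicate_succ', List.append_assoc]
      rw [h2]
    · simp only [List.foldl_cons, pvAstep, if_neg hb, List.nil_append]
      rw [pvAfold_prefix k l (pvBurstA c k ((n : Int) + 1)) b 1]
      have hhead : (b :: l).head? ≠ some c := by simp [hb]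
      rw [pvBfold_replicate k c n (b :: l) hhead]
      have hb1 : (1 : Int) = ((0 : Nat) : Int) + 1 := by norm_num
      rw [List.append_assoc, hb1, ih b 0]
      simp

-- ===== VERDICT (by name: the statement is the Claim_ definition above) =====
theorem action_with_duration_spec : Claim_equal_action_with_duration := by
  intro actions k _ hpre
  unfold Spec_action_with_duration
  cases actions with
  | nil => exact absurd rfl hpre
  | cons a rest =>
    show (rest.foldl (pvAstep k) ([], a, 1)).1
        ++ pvBurstA (rest.foldl (pvAstep k) ([], a, 1)).2.1 k
             (rest.foldl (pvAstep k) ([], a, 1)).2.2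
      = action_with_duration_alt (a :: rest) k
    have h1 : (1 : Int) = ((0 : Nat) : Int) + 1 := by norm_num
    rw [h1, pvMain k rest a 0]
    simp [action_with_duration_alt]
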